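-- pv_equiv track=rewrite | github.com/SSH1007/Algorithm | 프로그래머스/lv0/120871. 저주의 숫자 3/저주의 숫자 3.py | solution
-- ===== SOURCE A (Python) =====
-- def solution(n):
--     answer = 0
--     lst = [0]*1001
--     for i in range(3, 1000, 3):
--         lst[i] = 1
--     for i in range(1000):
--         if '3' in str(i):
--             lst[i] = 1
--     cnt = 0
--     for i in range(1,1000):
--         if not lst[i]:
--             cnt+=1
--         if cnt == n:
--             answer = i
--             break
--     return answer
-- ===== SOURCE B (Python) =====
-- def solution(n):
--     # Enumerate digit-3-free numbers 1..999 directly via a base-9 digit bijection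
--     # (digits remapped through 0,1,2,4,5,6,7,8,9), so numbers containing '3' are
--     # never generated or tested; only the mod-3 condition remains to check.
--     digits = (0, 1, 2, 4, 5, 6, 7, 8, 9)
--     cnt = 0
--     for k in range(1, 729):
--         m = digits[k % 9] + 10 * digits[k // 9 % 9] + 100 * digits[k // 81]
--         if m % 3:
--             cnt += 1
--             if cnt == n:
--                 return m
--     return 0
-- ===== Notes on version B (the rewrite author's own statement) =====
-- stated objective: alternative
-- what changed: Replaces the mark-table-then-scan over all integers 0..999 by a base-9 digit bijection that generates only the digit-3-free numbers in increasing order (digits remapped through 0,1,2,4,5,6,7,8,9), counting only the mod-3 survivors; no table, no string conversion, '3'-containing numbers are never produced.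
import Mathlib
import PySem

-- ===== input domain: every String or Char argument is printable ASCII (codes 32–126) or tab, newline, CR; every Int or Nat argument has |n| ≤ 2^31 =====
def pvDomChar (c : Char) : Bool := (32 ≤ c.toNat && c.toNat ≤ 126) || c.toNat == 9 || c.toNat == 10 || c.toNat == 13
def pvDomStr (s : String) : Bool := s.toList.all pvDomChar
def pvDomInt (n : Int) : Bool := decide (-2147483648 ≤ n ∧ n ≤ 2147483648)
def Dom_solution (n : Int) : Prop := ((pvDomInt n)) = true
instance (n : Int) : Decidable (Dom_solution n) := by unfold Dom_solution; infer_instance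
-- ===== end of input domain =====

-- B enumerates only the digit-3-free numbers 1..999 directly through a base-9
-- digit bijection (digits remapped through 0,1,2,4,5,6,7,8,9) and counts the
-- mod-3 survivors; no table, no string test; objective: alternative.

-- ===== PORT A =====
-- lst after the two marking passes (it does not depend on n)
def solution_lst : List Int :=
  (PySem.List.pyRange 0 1000 1).foldl
    (fun l i => if PySem.Str.isIn "3" (PySem.Int.toStr i) then PySem.List.pySetD l i 1 else l)
    ((PySem.List.pyRange 3 1000 3).foldl (fun l i => PySem.List.pySetD l i 1)  -- lst[i] = 1; i in range
      (List.replicate 1001 (0 : Int)))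

-- the third loop, with `break` as early return; returns answer (0 if no break)
def solution_loop (n : Int) : List Int → Int → Int
  | [], _ => 0
  | i :: rest, cnt =>
    let cnt := if PySem.List.pyGetD solution_lst i 0 == 0 then cnt + 1 else cnt  -- `not lst[i]`; i in range
    if cnt == n then i else solution_loop n rest cnt

def solution (n : Int) : Int :=
  solution_loop n (PySem.List.pyRange 1 1000 1) 0

-- ===== PORT B =====
def pvDigits : List Int := [0, 1, 2, 4, 5, 6, 7, 8, 9]

-- m = digits[k % 9] + 10 * digits[k // 9 % 9] + 100 * digits[k // 81]; all three
-- indices lie in 0..8 for k in 1..728, so .getD 0 never fires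
def pvRemap (k : Int) : Int :=
  (PySem.List.pyGet? pvDigits (PySem.Int.mod k 9)).getD 0
  + 10 * (PySem.List.pyGet? pvDigits (PySem.Int.mod (PySem.Int.floordiv k 9) 9)).getD 0
  + 100 * (PySem.List.pyGet? pvDigits (PySem.Int.floordiv k 81)).getD 0

-- the for-loop of Source B with its early `return m`
def solution_alt_loop (n : Int) : List Int → Int → Int
  | [], _ => 0
  | k :: rest, cnt =>
    let m := pvRemap k
    if PySem.Int.mod m 3 != 0 then     -- `if m % 3:`
      if (cnt + 1 : Int) == n then m else solution_alt_loop n rest (cnt + 1)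
    else solution_alt_loop n rest cnt

def solution_alt (n : Int) : Int :=
  solution_alt_loop n (PySem.List.pyRange 1 729 1) 0

-- ===== PRECONDITION & SPEC =====
def Spec_solution (n : Int) (out : Int) : Prop := out = solution_alt n
instance (n : Int) (out : Int) : Decidable (Spec_solution n out) := by unfold Spec_solution; infer_instance

-- ===== CLAIM (what is proved, stated in full; the proofs are below) =====
def Claim_equal_solution : Prop := ∀ (n : Int), Dom_solution n → Spec_solution n (solution n)

-- ===== LEMMAS AND PROOFS =====

def solution_goods : List Int :=
  (PySem.List.pyRange 1 1000 1).filter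
    (fun i => PySem.Int.mod i 3 != 0 && !(PySem.Str.isIn "3" (PySem.Int.toStr i)))

def solution_goodsB : List Int :=
  ((PySem.List.pyRange 1 729 1).map pvRemap).filter (fun m => PySem.Int.mod m 3 != 0)

lemma pv_len1 (L : List Int) : ∀ (l : List Int),
    (L.foldl (fun l i => PySem.List.pySetD l i 1) l).length = l.length := by
  induction L with
  | nil => intro l; rfl
  | cons j L ih =>
    intro l
    rw [List.foldl_cons, ih, PySem.List.length_pySetD]

lemma pv_getD_set (l : List Int) (j x : Int) (hj0 : 0 ≤ j) (_hj1 : j < (l.length : Int))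
    (hx0 : 0 ≤ x) (hx1 : x < (l.length : Int)) :
    PySem.List.pyGetD (PySem.List.pySetD l j 1) x 0 =
      if x = j then 1 else PySem.List.pyGetD l x 0 := by
  rw [PySem.List.pySetD_of_nonneg l 1 hj0,
      PySem.List.pyGetD_eq_getElem _ 0 hx0 (by rw [List.length_set]; exact hx1),
      List.getElem_set, PySem.List.pyGetD_eq_getElem l 0 hx0 hx1]
  split_ifs with h1 h2 h3 <;> first | rfl | (exfalso; omega)

lemma pv_get1 (L : List Int) : ∀ (l : List Int) (x : Int),
    (∀ j ∈ L, 0 ≤ j ∧ j < (l.length : Int)) → 0 ≤ x → x < (l.length : Int) →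
    PySem.List.pyGetD (L.foldl (fun l i => PySem.List.pySetD l i 1) l) x 0 =
      if x ∈ L then 1 else PySem.List.pyGetD l x 0 := by
  induction L with
  | nil => intro l x _ _ _; simp
  | cons j L ih =>
    intro l x hL hx0 hx1
    have hj := hL j List.mem_cons_self
    have hL' : ∀ k ∈ L, 0 ≤ k ∧ k < ((PySem.List.pySetD l j 1).length : Int) := by
      intro k hk
      have := hL k (List.mem_cons_of_mem _ hk)
      simpa [PySem.List.length_pySetD] using this
    rw [List.foldl_cons,
        ih _ x hL' hx0 (by simpa [PySem.List.length_pySetD] using hx1),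
        pv_getD_set l j x hj.1 hj.2 hx0 hx1]
    by_cases hmem : x ∈ L
    · simp [hmem]
    · by_cases hxj : x = j <;> simp [hmem, hxj, List.mem_cons]

lemma pv_get2 (c : Int → Bool) (L : List Int) : ∀ (l : List Int) (x : Int),
    (∀ j ∈ L, 0 ≤ j ∧ j < (l.length : Int)) → 0 ≤ x → x < (l.length : Int) →
    PySem.List.pyGetD (L.foldl (fun l i => if c i then PySem.List.pySetD l i 1 else l) l) x 0 =
      if x ∈ L ∧ c x = true then 1 else PySem.List.pyGetD l x 0 := by
  induction L with
  | nil => intro l x _ _ _; simp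
  | cons j L ih =>
    intro l x hL hx0 hx1
    have hj := hL j List.mem_cons_self
    have hlen : (if c j then PySem.List.pySetD l j 1 else l).length = l.length := by
      split <;> simp [PySem.List.length_pySetD]
    have hL' : ∀ k ∈ L, 0 ≤ k ∧ k < ((if c j then PySem.List.pySetD l j 1 else l).length : Int) := by
      intro k hk
      have := hL k (List.mem_cons_of_mem _ hk)
      simpa [hlen] using this
    rw [List.foldl_cons, ih _ x hL' hx0 (by simpa [hlen] using hx1)]
    by_cases hcj : c j = true
    · simp only [hcj, if_true]
      rw [pv_getD_set l j x hj.1 hj.2 hx0 hx1]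
      by_cases hxj : x = j
      · subst hxj
        rw [if_pos (⟨List.mem_cons_self, hcj⟩ : x ∈ x :: L ∧ c x = true)]
        split_ifs with hA hB
        · rfl
        · rfl
        · exact absurd rfl hB
      · have hiff : (x ∈ j :: L ∧ c x = true) ↔ (x ∈ L ∧ c x = true) := by
          simp [List.mem_cons, hxj]
        rw [if_neg hxj]
        by_cases hm : x ∈ L ∧ c x = true
        · rw [if_pos hm, if_pos (hiff.mpr hm)]
        · rw [if_neg hm, if_neg (fun h => hm (hiff.mp h))]
    · rw [Bool.not_eq_true] at hcj
      simp only [hcj, Bool.false_eq_true, if_false]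
      have hiff : (x ∈ j :: L ∧ c x = true) ↔ (x ∈ L ∧ c x = true) := by
        constructor
        · rintro ⟨hm, hcx⟩
          rcases List.mem_cons.mp hm with h | h
          · subst h; rw [hcj] at hcx; exact absurd hcx (by simp)
          · exact ⟨h, hcx⟩
        · rintro ⟨hm, hcx⟩; exact ⟨List.mem_cons_of_mem _ hm, hcx⟩
      by_cases hm : x ∈ L ∧ c x = true
      · rw [if_pos hm, if_pos (hiff.mpr hm)]
      · rw [if_neg hm, if_neg (fun h => hm (hiff.mp h))]

-- the table marks exactly the numbers divisible by 3 or containing digit '3'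
lemma pv_lst_char (i : Int) (h1 : 1 ≤ i) (h2 : i < 1000) :
    (PySem.List.pyGetD solution_lst i 0 == 0) =
      (PySem.Int.mod i 3 != 0 && !(PySem.Str.isIn "3" (PySem.Int.toStr i))) := by
  have hlen1 : ((((PySem.List.pyRange 3 1000 3).foldl (fun l i => PySem.List.pySetD l i 1)
      (List.replicate 1001 (0 : Int))).length : Nat) : Int) = 1001 := by
    rw [pv_len1, List.length_replicate]; norm_num
  have hlenr : (((List.replicate 1001 (0 : Int)).length : Nat) : Int) = 1001 := by
    rw [List.length_replicate]; norm_num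
  unfold solution_lst
  rw [pv_get2 _ _ _ i
      (by intro j hj
          rw [PySem.List.mem_pyRange_one] at hj
          rw [hlen1]
          omega)
      (by omega) (by rw [hlen1]; omega)]
  rw [pv_get1 _ _ i
      (by intro j hj
          rw [PySem.List.mem_pyRange_iff_of_pos (by norm_num)] at hj
          rw [hlenr]
          omega)
      (by omega) (by rw [hlenr]; omega)]
  have hbase : PySem.List.pyGetD (List.replicate 1001 (0 : Int)) i 0 = 0 := by
    rw [PySem.List.pyGetD_eq_getElem _ 0 (by omega) (by rw [hlenr]; omega)]
    exact List.getElem_replicate _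
  have hm0 : i ∈ PySem.List.pyRange 0 1000 1 := PySem.List.mem_pyRange_one.mpr ⟨by omega, by omega⟩
  have hm3 : (i ∈ PySem.List.pyRange 3 1000 3) ↔ (PySem.Int.mod i 3 = 0) := by
    rw [PySem.List.mem_pyRange_iff_of_pos (by norm_num), PySem.Int.mod_eq_zero_iff_dvd]
    constructor
    · rintro ⟨_, _, hd⟩; omega
    · intro hd; exact ⟨by omega, by omega, by omega⟩
  rw [hbase]
  by_cases hin : PySem.Str.isIn "3" (PySem.Int.toStr i) = true
  · rw [if_pos ⟨hm0, hin⟩]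
    simp only [hin, Bool.not_true, Bool.and_false]
    decide
  · rw [Bool.not_eq_true] at hin
    rw [if_neg (fun h => by rw [hin] at h; exact absurd h.2 (by simp))]
    by_cases hmod : PySem.Int.mod i 3 = 0
    · rw [if_pos (hm3.mpr hmod)]
      simp only [hin, hmod]
      decide
    · rw [if_neg (fun h => hmod (hm3.mp h))]
      have hb : (PySem.Int.mod i 3 != 0) = true := by
        rw [bne_iff_ne]
        exact hmod
      simp only [hin, hb, Bool.not_false, Bool.and_true]
      decide

-- A's table lookup selects exactly the valid numbers on the scanned range
lemma solution_filters_eq :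
    (PySem.List.pyRange 1 1000 1).filter
      (fun i => PySem.List.pyGetD solution_lst i 0 == 0) = solution_goods := by
  unfold solution_goods
  apply List.filter_congr
  intro x hx
  rw [PySem.List.mem_pyRange_one] at hx
  exact pv_lst_char x hx.1 hx.2

-- once cnt has passed n, A's loop can never break again
lemma solution_loop_gt (L : List Int) (n cnt : Int) (h : n < cnt) :
    solution_loop n L cnt = 0 := by
  induction L generalizing cnt with
  | nil => rfl
  | cons i rest ih =>
    simp only [solution_loop]
    split <;> rename_i h2
    · split <;> rename_i h3
      · exfalso; simp only [beq_iff_eq] at h3; omega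
      · exact ih (cnt + 1) (by omega)
    · split <;> rename_i h3
      · exfalso; simp only [beq_iff_eq] at h3; omega
      · exact ih cnt h

-- A's loop from counter cnt < n returns the (n-cnt)-th surviving element (0 if exhausted)
lemma solution_loop_eq (L : List Int) (n : Int) : ∀ (cnt : Int), cnt < n →
    solution_loop n L cnt =
      ((L.filter (fun i => PySem.List.pyGetD solution_lst i 0 == 0))[(n - 1 - cnt).toNat]?).getD 0 := by
  induction L with
  | nil => intro cnt _; rfl
  | cons i rest ih =>
    intro cnt h
    simp only [solution_loop, List.filter_cons]
    by_cases hp : (PySem.List.pyGetD solution_lst i 0 == 0) = true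
    · simp only [hp, if_true]
      by_cases hb : cnt + 1 = n
      · have h0 : (n - 1 - cnt).toNat = 0 := by omega
        simp [hb, h0]
      · have h' : cnt + 1 < n := by omega
        have hind : (n - 1 - cnt).toNat = (n - 1 - (cnt + 1)).toNat + 1 := by omega
        have hf : ((cnt + 1 : Int) == n) = false := by simp [hb]
        simp [hf, ih (cnt + 1) h', hind]
    · simp only [Bool.not_eq_true] at hp
      have hf : ((cnt : Int) == n) = false := by simp; omega
      simp [hp, hf, ih cnt h]

-- if cnt has already reached n, B's loop can never return early
lemma solution_alt_loop_le (n : Int) (L : List Int) : ∀ (cnt : Int), n ≤ cnt →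
    solution_alt_loop n L cnt = 0 := by
  induction L with
  | nil => intro cnt _; rfl
  | cons k rest ih =>
    intro cnt h
    simp only [solution_alt_loop]
    split
    · split <;> rename_i h3
      · exfalso; simp only [beq_iff_eq] at h3; omega
      · exact ih (cnt + 1) (by omega)
    · exact ih cnt h

-- B's loop from counter cnt < n returns the (n-cnt)-th surviving mapped element
lemma solution_alt_loop_eq (L : List Int) (n : Int) : ∀ (cnt : Int), cnt < n →
    solution_alt_loop n L cnt =
      (((L.map pvRemap).filter (fun m => PySem.Int.mod m 3 != 0))[(n - 1 - cnt).toNat]?).getD 0 := by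
  induction L with
  | nil => intro cnt _; rfl
  | cons k rest ih =>
    intro cnt h
    simp only [solution_alt_loop, List.map_cons, List.filter_cons]
    by_cases hp : (PySem.Int.mod (pvRemap k) 3 != 0) = true
    · simp only [hp, if_true]
      by_cases hb : cnt + 1 = n
      · have h0 : (n - 1 - cnt).toNat = 0 := by omega
        have ht : ((cnt + 1 : Int) == n) = true := by simp [hb]
        simp [ht, h0]
      · have hf : ((cnt + 1 : Int) == n) = false := by simp [hb]
        have hind : (n - 1 - cnt).toNat = (n - 1 - (cnt + 1)).toNat + 1 := by omega
        simp [hf, ih (cnt + 1) (by omega), hind]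
    · simp only [hp, Bool.false_eq_true, if_false]
      exact ih cnt h

-- the two enumerations produce the same list of valid numbers (closed computation)
set_option maxRecDepth 100000 in
lemma solution_goods_eq : solution_goodsB = solution_goods := by decide

-- ===== VERDICT (by name: the statement is the Claim_ definition above) =====
theorem solution_spec : Claim_equal_solution := by
  intro n _
  show solution n = solution_alt n
  unfold solution solution_alt
  by_cases h1 : 1 ≤ n
  · rw [solution_loop_eq _ n 0 (by omega), solution_filters_eq,
        solution_alt_loop_eq _ n 0 (by omega)]
    rw [show ((PySem.List.pyRange 1 729 1).map pvRemap).filter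
          (fun m => PySem.Int.mod m 3 != 0) = solution_goodsB from rfl,
        solution_goods_eq]
  · rw [solution_alt_loop_le n _ 0 (by omega)]
    by_cases h0 : n = 0
    · -- first iteration (i = 1) makes cnt = 1 > 0, then A's loop runs dry
      subst h0
      have hp : (PySem.List.pyGetD solution_lst 1 0 == 0) = true := by
        rw [pv_lst_char 1 (by norm_num) (by norm_num)]
        decide
      rw [PySem.List.pyRange_one_cons (by norm_num : (1:Int) < 1000)]
      simp only [solution_loop, hp, if_true]
      rw [if_neg (by decide)]
      exact solution_loop_gt _ 0 (0 + 1) (by omega)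
    · exact solution_loop_gt _ n 0 (by omega)
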